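-- pv_equiv track=rewrite | github.com/ArturMosk/Python_Basic-Skillbox- | Module22/03_zen_of_python_2/main.py | find_letters_amount_and_the_rarest_letter
-- ===== SOURCE A (Python) =====
-- def find_letters_amount_and_the_rarest_letter(strings):
--     letters = dict()
--     for string in strings:
--         string = string.rstrip('\n')
--         for symbol in string.lower():
--             if symbol.isalpha() and symbol in letters:
--                 letters[symbol] += 1
--             elif symbol.isalpha() and symbol not in letters:
--                 letters[symbol] = 1
--
--     letters_total = sum(letters.values())
--
--     letters_rarest = ''
--     amount_min = min(letters.values())
--     for letter, amount in letters.items():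
--         if amount == amount_min:
--             letters_rarest += letter + ' '
--
--     return letters_total, letters_rarest
-- ===== SOURCE B (Python) =====
-- def find_letters_amount_and_the_rarest_letter(strings):
--     # One flattened pass over "".join(strings).lower() with dict.get, then an
--     # inverted frequency->letters grouping; min over group keys picks the rarest bucket.
--     counts = {}
--     for symbol in "".join(strings).lower():
--         if symbol.isalpha():
--             counts[symbol] = counts.get(symbol, 0) + 1
--     groups = {}
--     for letter, amount in counts.items():
--         groups.setdefault(amount, []).append(letter)
--     amount_min = min(groups)
--     return sum(counts.values()), "".join(letter + " " for letter in groups[amount_min])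
-- ===== Notes on version B (the rewrite author's own statement) =====
-- stated objective: alternative
-- what changed: B counts in one flattened pass over ''.join(strings).lower() with dict.get instead of A's per-string rstrip/lower loops with membership branches, then inverts the counts into a frequency->letters grouping and reads the min-frequency bucket instead of A's second filter pass over items.
import Mathlib
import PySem

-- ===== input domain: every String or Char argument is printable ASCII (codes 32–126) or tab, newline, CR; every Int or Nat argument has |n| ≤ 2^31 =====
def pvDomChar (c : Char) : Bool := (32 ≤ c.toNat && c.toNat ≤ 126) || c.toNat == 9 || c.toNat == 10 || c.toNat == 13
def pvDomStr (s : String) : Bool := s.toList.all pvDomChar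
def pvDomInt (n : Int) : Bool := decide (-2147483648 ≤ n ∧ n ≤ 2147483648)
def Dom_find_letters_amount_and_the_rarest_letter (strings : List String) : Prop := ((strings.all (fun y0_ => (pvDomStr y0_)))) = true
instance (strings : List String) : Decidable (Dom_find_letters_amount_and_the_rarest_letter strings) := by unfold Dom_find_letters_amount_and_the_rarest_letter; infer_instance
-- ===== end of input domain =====

-- B replaces A's per-string rstrip/lower loops and items-filter tail by one flattened
-- counting pass plus an inverted frequency→letters grouping (objective: alternative).

-- ===== PORT A =====
def find_letters_amount_and_the_rarest_letter (strings : List String) : Int × String :=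
  let letters : PySem.Dict Char Int := strings.foldl (fun d s =>
    -- string.rstrip('\n'): hand port of rstrip with the char set {'\n'} (exact: drops trailing '\n' only)
    let stripped : List Char := (s.toList.reverse.dropWhile (fun c => c == '\n')).reverse
    (PySem.Chars.lower stripped).foldl (fun d c =>
      if PySem.Chars.isalpha c && d.contains c then d.modify c 0 (· + 1)
      else if PySem.Chars.isalpha c && !(d.contains c) then d.insert c 1
      else d) d) PySem.Dict.empty
  let letters_total : Int := letters.values.sum
  match PySem.List.min? letters.values (fun v => v) with
  | none => (letters_total, "")  -- min([]) raises ValueError in Python; excluded by Pre_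
  | some amount_min =>
    (letters_total, String.ofList (letters.items.foldl
      (fun acc p => if p.2 == amount_min then acc ++ [p.1, ' '] else acc) []))

-- ===== PORT B =====
def find_letters_amount_and_the_rarest_letter_alt (strings : List String) : Int × String :=
  let counts : PySem.Dict Char Int :=
    (PySem.Chars.lower (PySem.Chars.join [] (strings.map String.toList))).foldl
      (fun d c => if PySem.Chars.isalpha c then d.insert c (d.getD c 0 + 1) else d)
      PySem.Dict.empty
  -- groups.setdefault(amount, []).append(letter): exact — setdefault keeps position, append rewrites the stored list in place
  let groups : PySem.Dict Int (List Char) :=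
    counts.items.foldl (fun g p => g.insert p.2 (g.getD p.2 [] ++ [p.1])) PySem.Dict.empty
  match PySem.List.min? groups.keys (fun k => k) with
  | none => (counts.values.sum, "")  -- min({}) raises ValueError in Python; excluded by Pre_
  | some amount_min =>
    (counts.values.sum,
     String.ofList (PySem.Chars.join [] ((groups.getD amount_min []).map (fun l => [l, ' ']))))

-- ===== PRECONDITION & SPEC =====
-- Pre_ excludes inputs containing no alphabetic character: there Python A applies min() to an
-- empty sequence and raises ValueError (B raises the same way there).
def Pre_find_letters_amount_and_the_rarest_letter (strings : List String) : Prop :=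
  (strings.any (fun s => s.toList.any PySem.Chars.isalpha)) = true
instance (strings : List String) : Decidable (Pre_find_letters_amount_and_the_rarest_letter strings) := by unfold Pre_find_letters_amount_and_the_rarest_letter; infer_instance

def pvWitness_find_letters_amount_and_the_rarest_letter : List String := ["Zen of\n", "python!"]

def Spec_find_letters_amount_and_the_rarest_letter (strings : List String) (out : Int × String) : Prop := out = find_letters_amount_and_the_rarest_letter_alt strings
instance (strings : List String) (out : Int × String) : Decidable (Spec_find_letters_amount_and_the_rarest_letter strings out) := by unfold Spec_find_letters_amount_and_the_rarest_letter; infer_instance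

-- ===== CLAIM (what is proved, stated in full; the proofs are below) =====
def Claim_equal_find_letters_amount_and_the_rarest_letter : Prop := ∀ (strings : List String), Dom_find_letters_amount_and_the_rarest_letter strings → Pre_find_letters_amount_and_the_rarest_letter strings → Spec_find_letters_amount_and_the_rarest_letter strings (find_letters_amount_and_the_rarest_letter strings)

-- ===== LEMMAS AND PROOFS =====

-- A's two counting branches are B's single get-and-overwrite step
theorem pv_step_eq (d : PySem.Dict Char Int) (c : Char) :
    (if PySem.Chars.isalpha c && d.contains c then d.modify c 0 (· + 1)
     else if PySem.Chars.isalpha c && !(d.contains c) then d.insert c 1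
     else d)
    = (if PySem.Chars.isalpha c then d.insert c (d.getD c 0 + 1) else d) := by
  by_cases ha : PySem.Chars.isalpha c = true
  · by_cases hc : d.contains c = true
    · simp [ha, hc, PySem.Dict.modify]
    · simp only [Bool.not_eq_true] at hc
      rw [PySem.Dict.getD_of_not_contains d 0 hc]
      simp [ha, hc]
  · simp only [Bool.not_eq_true] at ha
    simp [ha]

-- rstrip('\n') only removes trailing '\n' characters, which the counting step ignores
theorem pv_fold_rstrip (s : List Char) (d : PySem.Dict Char Int) :
    (PySem.Chars.lower ((s.reverse.dropWhile (fun c => c == '\n')).reverse)).foldl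
      (fun d c => if PySem.Chars.isalpha c then d.insert c (d.getD c 0 + 1) else d) d
    = (PySem.Chars.lower s).foldl
      (fun d c => if PySem.Chars.isalpha c then d.insert c (d.getD c 0 + 1) else d) d := by
  have hsplit : s = (s.reverse.dropWhile (fun c => c == '\n')).reverse
      ++ (s.reverse.takeWhile (fun c => c == '\n')).reverse := by
    have h := List.takeWhile_append_dropWhile (p := fun c => c == '\n') (l := s.reverse)
    calc s = s.reverse.reverse := (List.reverse_reverse s).symm
    _ = (s.reverse.takeWhile (fun c => c == '\n') ++ s.reverse.dropWhile (fun c => c == '\n')).reverse := by rw [h]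
    _ = _ := by rw [List.reverse_append]
  have hid : ∀ d' : PySem.Dict Char Int,
      ((s.reverse.takeWhile (fun c => c == '\n')).reverse.map PySem.Chars.lowerChar).foldl
        (fun d c => if PySem.Chars.isalpha c then d.insert c (d.getD c 0 + 1) else d) d' = d' := by
    intro d'
    rw [PySem.List.foldl_congr_mem _ _ (fun acc _ => acc) _ ?_, PySem.List.foldl_ignore]
    intro acc x hx
    simp only [List.mem_map, List.mem_reverse] at hx
    obtain ⟨y, hy, rfl⟩ := hx
    have hy' : y = '\n' := by simpa using List.mem_takeWhile_imp hy
    subst hy'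
    have hni : PySem.Chars.isalpha (PySem.Chars.lowerChar '\n') = false := by decide
    simp [hni]
  conv_rhs => rw [hsplit]
  simp only [PySem.Chars.lower, List.map_append, List.foldl_append]
  rw [hid]

-- ''.join(parts) is concatenation
theorem pv_join_empty (L : List (List Char)) : PySem.Chars.join [] L = L.flatten := by
  induction L with
  | nil => simp [PySem.Chars.join_nil]
  | cons a t ih =>
    cases t with
    | nil => simp [PySem.Chars.join_singleton]
    | cons b r => rw [PySem.Chars.join_cons_cons]; simp at ih ⊢; rw [ih]

-- both ports build the same letter-count dict
theorem pv_counts_eq (strings : List String) :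
    strings.foldl (fun d s =>
      (PySem.Chars.lower ((s.toList.reverse.dropWhile (fun c => c == '\n')).reverse)).foldl
        (fun d c =>
          if PySem.Chars.isalpha c && d.contains c then d.modify c 0 (· + 1)
          else if PySem.Chars.isalpha c && !(d.contains c) then d.insert c 1
          else d) d) (PySem.Dict.empty : PySem.Dict Char Int)
    = (PySem.Chars.lower (PySem.Chars.join [] (strings.map String.toList))).foldl
        (fun d c => if PySem.Chars.isalpha c then d.insert c (d.getD c 0 + 1) else d)
        PySem.Dict.empty := by
  rw [pv_join_empty, PySem.Chars.lower, List.map_flatten, List.foldl_flatten, List.map_map,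
    List.foldl_map]
  apply PySem.List.foldl_congr_mem
  intro acc s _
  rw [show (List.map PySem.Chars.lowerChar ∘ String.toList) s = PySem.Chars.lower s.toList from rfl]
  rw [PySem.List.foldl_congr_mem _ _
    (fun d c => if PySem.Chars.isalpha c then d.insert c (d.getD c 0 + 1) else d) _
    (fun a c _ => pv_step_eq a c)]
  exact pv_fold_rstrip s.toList acc

theorem pv_flatMap_ite {α β : Type} (p : α → Bool) (g : α → List β) (l : List α) :
    l.flatMap (fun x => if p x then g x else []) = (l.filter p).flatMap g := by
  induction l with
  | nil => rfl
  | cons a t ih => by_cases h : p a = true <;> simp [h, ih]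

-- B's frequency bucket for m holds exactly the letters whose count is m, in dict order
theorem pv_groupsD (d : PySem.Dict Char Int) (m : Int) :
    (d.items.foldl (fun g p => g.insert p.2 (g.getD p.2 [] ++ [p.1]))
      (PySem.Dict.empty : PySem.Dict Int (List Char))).getD m []
    = (d.items.filter (fun p => p.2 == m)).map (fun p => p.1) := by
  have h1 : (fun (g : PySem.Dict Int (List Char)) (p : Char × Int) =>
      g.insert p.2 (g.getD p.2 [] ++ [p.1]))
      = fun g p => g.modify p.2 [] (· ++ [p.1]) := rfl
  rw [h1]
  rw [show d.items.foldl (fun (g : PySem.Dict Int (List Char)) (p : Char × Int) => g.modify p.2 [] (· ++ [p.1])) PySem.Dict.empty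
      = ((d.items.map (fun p => (p.2, p.1))).foldl (fun g q => g.modify q.1 [] (· ++ [q.2])) PySem.Dict.empty) by
    rw [List.foldl_map]]
  rw [PySem.Dict.getD_foldl_modify_append]
  simp only [PySem.Dict.getD_empty, List.filter_map, List.map_map, List.nil_append]
  rfl

-- the group keys are the distinct count values
theorem pv_keys_groups (d : PySem.Dict Char Int) :
    (d.items.foldl (fun g p => g.insert p.2 (g.getD p.2 [] ++ [p.1]))
      (PySem.Dict.empty : PySem.Dict Int (List Char))).keys
    = PySem.Set.ofList d.values := by
  rw [PySem.Dict.keys_foldl_insert_key d.items (fun p => p.2)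
    (fun g p => g.getD p.2 [] ++ [p.1]) PySem.Dict.empty]
  rw [PySem.Dict.keys_empty, PySem.Set.ofList_eq_foldl]
  rfl

-- the minimum of a list equals the minimum of its ordered dedup
theorem pv_min_set (vs : List Int) :
    PySem.List.min? vs (fun v => v) = PySem.List.min? (PySem.Set.ofList vs) (fun v => v) := by
  cases h : PySem.List.min? vs (fun v => v) with
  | none =>
    rw [PySem.List.min?_eq_none_iff] at h
    subst h
    rfl
  | some mA =>
    cases h2 : PySem.List.min? (PySem.Set.ofList vs) (fun v => v) with
    | none =>
      rw [PySem.List.min?_eq_none_iff] at h2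
      have hm : mA ∈ PySem.Set.ofList vs := (PySem.Set.mem_ofList vs mA).mpr (PySem.List.min?_mem h)
      rw [h2] at hm
      simp at hm
    | some mB =>
      have hA1 := PySem.List.min?_mem h
      have hA2 := PySem.List.min?_isMin h
      have hB1 := (PySem.Set.mem_ofList vs mB).mp (PySem.List.min?_mem h2)
      have hB2 := PySem.List.min?_isMin h2
      have : mA = mB := le_antisymm (hA2 mB hB1) (hB2 mA ((PySem.Set.mem_ofList vs mA).mpr hA1))
      rw [this]

-- A's filter-and-append tail = B's join over the rarest bucket
theorem pv_rarest_eq (d : PySem.Dict Char Int) (m : Int) :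
    (d.items.foldl (fun acc p => if p.2 == m then acc ++ [p.1, ' '] else acc) [])
    = PySem.Chars.join [] ((((d.items.foldl (fun g p => g.insert p.2 (g.getD p.2 [] ++ [p.1]))
        (PySem.Dict.empty : PySem.Dict Int (List Char))).getD m [])).map (fun l => [l, ' '])) := by
  rw [PySem.List.foldl_congr_mem _ _
    (fun acc p => acc ++ (if p.2 == m then [p.1, ' '] else [])) _ ?_]
  · rw [PySem.List.foldl_append_eq_flatMap, List.nil_append, pv_flatMap_ite, pv_groupsD,
      pv_join_empty, ← List.flatMap_def, List.flatMap_map]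
  · intro acc x _
    by_cases h : (x.2 == m) = true <;> simp [h]

-- ===== VERDICT (by name: the statement is the Claim_ definition above) =====
theorem find_letters_amount_and_the_rarest_letter_spec : Claim_equal_find_letters_amount_and_the_rarest_letter := by
  intro strings _ _
  unfold Spec_find_letters_amount_and_the_rarest_letter
  unfold find_letters_amount_and_the_rarest_letter find_letters_amount_and_the_rarest_letter_alt
  simp only []
  rw [pv_counts_eq strings]
  rw [pv_keys_groups, ← pv_min_set]
  cases h : PySem.List.min?
      ((PySem.Chars.lower (PySem.Chars.join [] (strings.map String.toList))).foldl
        (fun d c => if PySem.Chars.isalpha c then d.insert c (d.getD c 0 + 1) else d)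
        (PySem.Dict.empty : PySem.Dict Char Int)).values (fun v => v) with
  | none => rfl
  | some m =>
    show (_, String.ofList _) = (_, String.ofList _)
    congr 1
    exact congrArg String.ofList (pv_rarest_eq _ m)
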